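-- pv_equiv track=rewrite | github.com/282560/Text2Image | new_dataloader.py | complete_name
-- ===== SOURCE A (Python) =====
-- def complete_name(idx, ext):
--     num = idx
--     positions = []
--     while num != 0:
--         positions.append(num % 10)
--         num = num // 10
--     fullfill = ((5 - len(positions)) * '0')
--     for i in reversed(positions):
--         fullfill = fullfill + str(i)
--     return 'image_' + fullfill + '.' + ext
-- ===== SOURCE B (Python) =====
-- def complete_name(idx, ext):
--     return 'image_' + str(idx).zfill(5) + '.' + ext
-- ===== Notes on version B (the rewrite author's own statement) =====
-- stated objective: simpler
-- what changed: Replaces the digit-extraction while-loop, the manual padding and the digit-by-digit string rebuild with a single str(idx).zfill(5) closed-form formatting call.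
import Mathlib
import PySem

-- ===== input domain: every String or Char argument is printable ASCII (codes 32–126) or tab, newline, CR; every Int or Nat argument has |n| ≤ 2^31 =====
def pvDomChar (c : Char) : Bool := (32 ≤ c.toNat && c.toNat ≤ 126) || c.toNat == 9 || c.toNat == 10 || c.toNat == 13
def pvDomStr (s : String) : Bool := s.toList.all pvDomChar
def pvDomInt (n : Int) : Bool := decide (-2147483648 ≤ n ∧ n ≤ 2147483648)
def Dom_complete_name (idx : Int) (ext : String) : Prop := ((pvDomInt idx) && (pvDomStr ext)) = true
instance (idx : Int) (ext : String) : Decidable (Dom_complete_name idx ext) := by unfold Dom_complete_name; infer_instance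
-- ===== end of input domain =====

-- B replaces A's digit-extraction while-loop and manual zero padding with a single
-- str(idx).zfill(5) formatting call (objective: simpler).

-- ===== PORT A =====
-- A's 'while num != 0' loop; the guard is written '0 < num' only to make the recursion
-- total in Lean (for num < 0 the Python loop never terminates, which Pre_ excludes;
-- for num ≥ 0 the two guards coincide, so the values agree everywhere inside Pre_).
def pvDigits (num : Int) (acc : List Int) : List Int :=
  if 0 < num then pvDigits (PySem.Int.floordiv num 10) (acc ++ [PySem.Int.mod num 10]) else acc
termination_by num.toNat
decreasing_by
  rename_i h
  rw [PySem.Int.floordiv_eq_ediv_of_pos (by norm_num : (0:Int) < 10)]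
  omega

def complete_name (idx : Int) (ext : String) : String :=
  let positions := pvDigits idx []
  -- fullfill = ((5 - len(positions)) * '0') ; Nat subtraction clamps at 0 like Python's negative string repeat
  let fullfill0 := String.ofList (List.replicate (5 - positions.length) '0')
  -- for i in reversed(positions): fullfill = fullfill + str(i)
  let fullfill := positions.reverse.foldl (fun s i => s ++ PySem.Int.toStr i) fullfill0
  "image_" ++ fullfill ++ "." ++ ext

-- ===== PORT B =====
def complete_name_alt (idx : Int) (ext : String) : String :=
  "image_" ++ PySem.Str.zfill (PySem.Int.toStr idx) 5 ++ "." ++ ext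

-- ===== PRECONDITION & SPEC =====
-- Pre_ excludes negative idx, on which the Python A's while-loop never terminates
-- (num // 10 stays at -1 forever), so A returns no value there.
def Pre_complete_name (idx : Int) (ext : String) : Prop := 0 ≤ idx
instance (idx : Int) (ext : String) : Decidable (Pre_complete_name idx ext) := by unfold Pre_complete_name; infer_instance
def pvWitness_complete_name : Int × String := (12345, "png")

def Spec_complete_name (idx : Int) (ext : String) (out : String) : Prop := out = complete_name_alt idx ext
instance (idx : Int) (ext : String) (out : String) : Decidable (Spec_complete_name idx ext out) := by unfold Spec_complete_name; infer_instance

-- ===== CLAIM (what is proved, stated in full; the proofs are below) =====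
def Claim_equal_complete_name : Prop := ∀ (idx : Int) (ext : String), Dom_complete_name idx ext → Pre_complete_name idx ext → Spec_complete_name idx ext (complete_name idx ext)

-- ===== LEMMAS AND PROOFS =====

theorem pvDigits_nat (m : Nat) (acc : List Int) :
    pvDigits (m : Int) acc =
      if 0 < m then pvDigits ((m / 10 : Nat) : Int) (acc ++ [((m % 10 : Nat) : Int)]) else acc := by
  rw [pvDigits]
  simp

theorem pvDigits_acc (m : Nat) (acc : List Int) :
    pvDigits (m : Int) acc = acc ++ pvDigits (m : Int) [] := by
  induction m using Nat.strong_induction_on generalizing acc with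
  | _ m ih =>
    rw [pvDigits_nat, pvDigits_nat m []]
    by_cases h : 0 < m
    · simp only [h, if_pos]
      rw [ih (m/10) (by omega) (acc ++ [((m % 10 : Nat) : Int)]),
          ih (m/10) (by omega) ([] ++ [((m % 10 : Nat) : Int)])]
      simp
    · simp [h]

theorem pvDigits_mem (m : Nat) : ∀ d ∈ pvDigits (m : Int) [], ∃ k : Nat, k < 10 ∧ d = (k : Int) := by
  induction m using Nat.strong_induction_on with
  | _ m ih =>
    rw [pvDigits_nat]
    by_cases h : 0 < m
    · simp only [h, if_pos]
      rw [pvDigits_acc]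
      intro d hd
      rcases List.mem_append.1 hd with h1 | h2
      · exact ⟨m % 10, by omega, by simpa using h1⟩
      · exact ih (m/10) (by omega) d h2
    · simp [h]

theorem toDigits_small (k : Nat) (hk : k < 10) : Nat.toDigits 10 k = [Nat.digitChar k] := by
  unfold Nat.toDigits Nat.toDigitsCore
  simp [Nat.div_eq_of_lt hk, Nat.mod_eq_of_lt hk]

theorem toChars_small (k : Nat) (hk : k < 10) : PySem.Int.toChars (k : Int) = [Nat.digitChar k] := by
  unfold PySem.Int.toChars
  simp [toDigits_small k hk]

theorem toDigitsCore_append (b f n : Nat) (ds : List Char) :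
    Nat.toDigitsCore b f n ds = Nat.toDigitsCore b f n [] ++ ds := by
  induction f generalizing n ds with
  | zero => simp [Nat.toDigitsCore]
  | succ f ih =>
    simp only [Nat.toDigitsCore]
    by_cases h : n / b = 0
    · simp [h]
    · simp only [h, reduceIte]
      rw [ih (n/b) [Nat.digitChar (n % b)], ih (n/b) (Nat.digitChar (n % b) :: ds)]
      simp

theorem toDigitsCore_fuel (n : Nat) : ∀ f f', n < f → n < f' →
    Nat.toDigitsCore 10 f n [] = Nat.toDigitsCore 10 f' n [] := by
  induction n using Nat.strong_induction_on with
  | _ n ih =>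
    intro f f' hf hf'
    match f, f' with
    | f+1, f'+1 =>
      simp only [Nat.toDigitsCore]
      by_cases h : n / 10 = 0
      · simp [h]
      · simp only [h, reduceIte]
        rw [toDigitsCore_append 10 f, toDigitsCore_append 10 f']
        rw [ih (n/10) (by omega) f f' (by omega) (by omega)]

theorem toDigits_step (n : Nat) (hn : 10 ≤ n) :
    Nat.toDigits 10 n = Nat.toDigits 10 (n / 10) ++ [Nat.digitChar (n % 10)] := by
  unfold Nat.toDigits
  conv_lhs => rw [Nat.toDigitsCore]
  have h : ¬ (n / 10 = 0) := by omega
  simp only [h, reduceIte]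
  rw [toDigitsCore_append]
  rw [toDigitsCore_fuel (n/10) n (n/10+1) (by omega) (by omega)]

theorem pvDigits_chars (m : Nat) (hm : 0 < m) :
    (pvDigits (m : Int) []).reverse.flatMap (fun i => PySem.Int.toChars i) = Nat.toDigits 10 m := by
  induction m using Nat.strong_induction_on with
  | _ m ih =>
    rw [pvDigits_nat, if_pos hm, pvDigits_acc]
    by_cases h : m < 10
    · have h10 : m / 10 = 0 := by omega
      have hm10 : m % 10 = m := by omega
      rw [h10, hm10]
      rw [pvDigits_nat 0]
      simp [toChars_small m h, toDigits_small m h]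
    · rw [toDigits_step m (by omega)]
      simp only [List.reverse_append, List.flatMap_append, List.nil_append,
        List.reverse_cons, List.reverse_nil, List.flatMap_cons, List.flatMap_nil]
      rw [ih (m/10) (by omega) (by omega)]
      have hc : PySem.Int.toChars (((m : Int)) % 10) = [(m % 10).digitChar] := by
        rw [show ((m:Int) % 10) = ((m % 10 : Nat) : Int) from by push_cast; ring]
        exact toChars_small _ (by omega)
      simp [hc]

theorem fold_concat_toList (l : List Int) (init : String) :
    (l.foldl (fun s i => s ++ PySem.Int.toStr i) init).toList
      = init.toList ++ l.flatMap (fun i => PySem.Int.toChars i) := by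
  induction l generalizing init with
  | nil => simp
  | cons x xs ih =>
    simp only [List.foldl_cons, List.flatMap_cons]
    rw [ih]
    simp [PySem.Int.toList_toStr]

theorem digitChar_not_sign (k : Nat) (hk : k < 10) :
    ¬ (Nat.digitChar k = '+' ∨ Nat.digitChar k = '-') := by
  interval_cases k <;> decide

theorem zfill_digits (cs : List Char)
    (hd : ∀ c ∈ cs, ∃ k : Nat, k < 10 ∧ c = Nat.digitChar k) :
    PySem.Chars.zfill cs 5 = List.replicate (5 - cs.length) '0' ++ cs := by
  unfold PySem.Chars.zfill
  by_cases h : (5:Int) ≤ (cs.length : Int)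
  · rw [if_pos h]
    have : 5 - cs.length = 0 := by omega
    simp [this]
  · rw [if_neg h]
    match cs with
    | [] => simp
    | c :: rest =>
      obtain ⟨k, hk, hc⟩ := hd c List.mem_cons_self
      have hns := digitChar_not_sign k hk
      subst hc
      simp [hns]

theorem toChars_nat (m : Nat) : PySem.Int.toChars (m : Int) = Nat.toDigits 10 m := by
  unfold PySem.Int.toChars
  simp

theorem toDigits_len (m : Nat) (hm : 0 < m) :
    (Nat.toDigits 10 m).length = (pvDigits (m : Int) []).length := by
  rw [← pvDigits_chars m hm, List.length_flatMap]
  have h1 : ∀ d ∈ (pvDigits (m : Int) []).reverse, (PySem.Int.toChars d).length = 1 := by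
    intro d hd
    obtain ⟨k, hk, rfl⟩ := pvDigits_mem m d (List.mem_reverse.1 hd)
    rw [toChars_small k hk]
    rfl
  rw [List.map_congr_left h1]
  simp

theorem toDigits_digitChars (m : Nat) (hm : 0 < m) :
    ∀ c ∈ Nat.toDigits 10 m, ∃ k : Nat, k < 10 ∧ c = Nat.digitChar k := by
  rw [← pvDigits_chars m hm]
  intro c hc
  obtain ⟨d, hd, hcd⟩ := List.mem_flatMap.1 hc
  obtain ⟨k, hk, rfl⟩ := pvDigits_mem m d (List.mem_reverse.1 hd)
  rw [toChars_small k hk] at hcd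
  exact ⟨k, hk, by simpa using hcd⟩

theorem complete_name_eq_alt (idx : Int) (ext : String) (h : 0 ≤ idx) :
    complete_name idx ext = complete_name_alt idx ext := by
  obtain ⟨m, rfl⟩ : ∃ m : Nat, idx = (m : Int) := ⟨idx.toNat, by omega⟩
  unfold complete_name complete_name_alt
  rw [← String.toList_inj]
  simp only [String.toList_append, List.append_cancel_left_eq, List.append_cancel_right_eq]
  rw [fold_concat_toList, PySem.Str.toList_zfill, PySem.Int.toList_toStr, toChars_nat,
    String.toList_ofList]
  by_cases hm : 0 < m
  · rw [zfill_digits _ (toDigits_digitChars m hm), pvDigits_chars m hm, toDigits_len m hm]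
  · have : m = 0 := by omega
    subst this
    rw [pvDigits_nat]
    simp
    decide

-- ===== VERDICT (by name: the statement is the Claim_ definition above) =====
theorem complete_name_spec : Claim_equal_complete_name := by
  intro idx ext _ hpre
  unfold Spec_complete_name
  exact complete_name_eq_alt idx ext hpre
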